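-- pv_equiv track=rewrite | github.com/jvnk0671/inter_autoprompting | pipeline.py | radical_cut
-- ===== SOURCE A (Python) =====
-- def radical_cut(prompt: str, ch_limit: int, uncertainty: int) -> str:
--     """Прямая обрезка промпта со слегка щадящей погрешностью и приоритетом обрезания символов"""
--     if ch_limit <= 0:
--         return ""
--
--     max_limit = uncertainty + ch_limit
--     if len(prompt) <= max_limit:
--         return prompt
--
--     min_limit = max(0, ch_limit - uncertainty)
--     cut = prompt[:max_limit]
--
--     markers_prior = [
--         ['\n'],
--         ['.', '!', '?'],
--         [',', ';'],
--         [' ']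
--     ]
--
--     for i in markers_prior:
--         further_idx = max(cut.rfind(t) for t in i)
--         if further_idx >= min_limit:
--             return cut[:further_idx + 1].rstrip(' ')
--
--     space = cut.rfind(' ')
--     if space != -1 and space >= min_limit:
--         return cut[:space].rstrip(' ')
--
--     return cut.rstrip(' ')
-- ===== SOURCE B (Python) =====
-- def radical_cut(prompt: str, ch_limit: int, uncertainty: int) -> str:
--     """Backward scan of the tolerance window keeping one best (rank, index)
--     pair under lexicographic order (class priority first, then rightmost),
--     with early exit once a top-priority newline is found."""
--     if ch_limit <= 0:
--         return ""
--
--     max_limit = uncertainty + ch_limit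
--     if len(prompt) <= max_limit:
--         return prompt
--
--     min_limit = max(0, ch_limit - uncertainty)
--     cut = prompt[:max_limit]
--
--     rank = {'\n': 0, '.': 1, '!': 1, '?': 1, ',': 2, ';': 2, ' ': 3}
--     best_rank, best_idx = 4, -1
--     i = len(cut) - 1
--     while i >= min_limit and best_rank > 0:
--         r = rank.get(cut[i], 4)
--         if r < best_rank:
--             best_rank, best_idx = r, i
--         i -= 1
--
--     if best_idx != -1:
--         return cut[:best_idx + 1].rstrip(' ')
--     return cut.rstrip(' ')
-- ===== Notes on version B (the rewrite author's own statement) =====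
-- stated objective: alternative
-- what changed: Replaces A's six separate rfind scans over the whole truncated string, per-class max, priority loop and unreachable trailing space-block by one backward scan restricted to the tolerance window that maintains a single best (rank, index) pair under lexicographic priority with early exit on a newline.
import Mathlib
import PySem

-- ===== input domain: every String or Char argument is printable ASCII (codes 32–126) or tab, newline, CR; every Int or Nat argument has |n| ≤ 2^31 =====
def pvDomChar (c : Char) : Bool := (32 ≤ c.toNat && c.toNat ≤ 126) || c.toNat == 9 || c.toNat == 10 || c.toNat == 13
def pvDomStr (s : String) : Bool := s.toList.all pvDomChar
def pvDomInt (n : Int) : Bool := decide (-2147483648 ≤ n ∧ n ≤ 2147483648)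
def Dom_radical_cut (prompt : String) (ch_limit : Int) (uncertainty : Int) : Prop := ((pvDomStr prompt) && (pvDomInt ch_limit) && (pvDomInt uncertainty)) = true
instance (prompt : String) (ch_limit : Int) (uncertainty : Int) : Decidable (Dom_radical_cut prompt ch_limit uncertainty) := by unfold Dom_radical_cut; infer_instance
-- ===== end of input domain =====

-- B replaces A's per-class rfind scans + priority loop by ONE backward scan of the tolerance
-- window keeping a single best (rank, index) pair with early exit on a newline (alternative
-- decomposition, same asymptotic cost).
-- ===== PORT A =====
-- rstrip(' '): drop trailing spaces (exact port of str.rstrip(' '); PySem has no chars-argument rstrip)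
def rstripSpace (l : List Char) : List Char := (l.reverse.dropWhile (· == ' ')).reverse

-- max(cut.rfind(t) for t in cls): Python max over the non-empty generator (classes are non-empty literals)
def maxRfindA (cut : List Char) (cls : List Char) : Int :=
  (PySem.List.max? (cls.map (fun t => PySem.Chars.rfind cut [t])) id).getD (-1)

-- the 'for i in markers_prior' loop with its early return
def loopA (cut : List Char) (min_limit : Int) : List (List Char) → Option String
  | [] => none
  | cls :: rest =>
    let further_idx := maxRfindA cut cls
    if further_idx ≥ min_limit then
      some (String.ofList (rstripSpace (PySem.List.slice cut none (some (further_idx + 1)))))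
    else loopA cut min_limit rest

def radical_cut (prompt : String) (ch_limit : Int) (uncertainty : Int) : String :=
  if ch_limit ≤ 0 then "" else
  let max_limit := uncertainty + ch_limit
  if (prompt.toList.length : Int) ≤ max_limit then prompt else
  let min_limit := max 0 (ch_limit - uncertainty)
  let cut := PySem.List.slice prompt.toList none (some max_limit)
  match loopA cut min_limit [['\n'], ['.', '!', '?'], [',', ';'], [' ']] with
  | some r => r
  | none =>
    let space := PySem.Chars.rfind cut [' ']
    if space ≠ -1 ∧ space ≥ min_limit then
      String.ofList (rstripSpace (PySem.List.slice cut none (some space)))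
    else String.ofList (rstripSpace cut)

-- ===== PORT B =====
-- rank.get(c, 4) for the literal dict of delimiter priorities
def rankOf (c : Char) : Int :=
  if c = '\n' then 0
  else if c = '.' ∨ c = '!' ∨ c = '?' then 1
  else if c = ',' ∨ c = ';' then 2
  else if c = ' ' then 3
  else 4

-- the 'while i >= min_limit and best_rank > 0' loop; cut[i] is in range whenever the
-- loop body runs in radical_cut_alt (0 ≤ min_limit ≤ i < len cut), so the getD default is never used
def loopB (cut : List Char) (min_limit : Int) (best : Int × Int) (i : Int) : Int × Int :=
  if h : min_limit ≤ i ∧ 0 < best.1 then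
    let r := rankOf ((PySem.List.pyGet? cut i).getD ' ')
    let best' := if r < best.1 then (r, i) else best
    loopB cut min_limit best' (i - 1)
  else best
termination_by (i - min_limit + 1).toNat
decreasing_by omega

def radical_cut_alt (prompt : String) (ch_limit : Int) (uncertainty : Int) : String :=
  if ch_limit ≤ 0 then "" else
  let max_limit := uncertainty + ch_limit
  if (prompt.toList.length : Int) ≤ max_limit then prompt else
  let min_limit := max 0 (ch_limit - uncertainty)
  let cut := PySem.List.slice prompt.toList none (some max_limit)
  let best := loopB cut min_limit (4, -1) ((cut.length : Int) - 1)
  if best.2 ≠ -1 then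
    String.ofList (rstripSpace (PySem.List.slice cut none (some (best.2 + 1))))
  else String.ofList (rstripSpace cut)

-- ===== PRECONDITION & SPEC =====
def Spec_radical_cut (prompt : String) (ch_limit : Int) (uncertainty : Int) (out : String) : Prop := out = radical_cut_alt prompt ch_limit uncertainty
instance (prompt : String) (ch_limit : Int) (uncertainty : Int) (out : String) : Decidable (Spec_radical_cut prompt ch_limit uncertainty out) := by unfold Spec_radical_cut; infer_instance

-- ===== CLAIM (what is proved, stated in full; the proofs are below) =====
def Claim_equal_radical_cut : Prop := ∀ (prompt : String) (ch_limit : Int) (uncertainty : Int), Dom_radical_cut prompt ch_limit uncertainty → Spec_radical_cut prompt ch_limit uncertainty (radical_cut prompt ch_limit uncertainty)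

-- ===== LEMMAS AND PROOFS =====

-- rightmost index in cs where p holds, -1 if none (the common characterisation)
def lastP (p : Char → Bool) (cs : List Char) : Int :=
  cs.zipIdx.foldl (fun acc q => if p q.1 then (q.2 : Int) else acc) (-1)

theorem lastP_append (p : Char → Bool) (cs : List Char) (c : Char) :
    lastP p (cs ++ [c]) = if p c then (cs.length : Int) else lastP p cs := by
  simp [lastP, List.zipIdx_append, List.foldl_append]

theorem lastP_lt_length (p : Char → Bool) (cs : List Char) :
    lastP p cs < (cs.length : Int) := by
  induction cs using List.reverseRecOn with
  | nil => simp [lastP]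
  | append_singleton cs c ih =>
    rw [lastP_append]
    by_cases h : p c <;> simp [h] <;> omega

theorem go_zero (s sub : List Char) :
    PySem.Chars.rfind.go s sub 0 = if sub.isPrefixOf s then 0 else -1 := rfl

theorem go_succ (s sub : List Char) (j : Nat) :
    PySem.Chars.rfind.go s sub (j + 1) =
      if sub.isPrefixOf (List.drop (j + 1) s) then ((j : Int) + 1) else
        PySem.Chars.rfind.go s sub j := by
  simp only [PySem.Chars.rfind.go]
  split <;> simp

theorem go_append (cs : List Char) (c' c : Char) (k : Nat) (hk : k < cs.length) :
    PySem.Chars.rfind.go (cs ++ [c']) [c] k = PySem.Chars.rfind.go cs [c] k := by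
  induction k with
  | zero =>
    rw [go_zero, go_zero]
    cases cs with
    | nil => simp at hk
    | cons d t => simp [List.isPrefixOf]
  | succ j ih =>
    rw [go_succ, go_succ, ih (by omega)]
    have hd : List.drop (j + 1) (cs ++ [c']) = List.drop (j + 1) cs ++ [c'] := by
      rw [List.drop_append_of_le_length (by omega)]
    rw [hd]
    have hne : List.drop (j + 1) cs ≠ [] := by
      simp [List.drop_eq_nil_iff]; omega
    obtain ⟨d, t, hdt⟩ := List.exists_cons_of_ne_nil hne
    rw [hdt]
    simp [List.isPrefixOf]

theorem rfind_single_append (cs : List Char) (c' c : Char) :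
    PySem.Chars.rfind (cs ++ [c']) [c] =
      if c' = c then (cs.length : Int) else PySem.Chars.rfind cs [c] := by
  cases cs with
  | nil =>
    simp only [PySem.Chars.rfind, List.nil_append, List.length_cons, List.length_nil,
      List.length_cons]
    rw [show (0 + 1 : Nat) = 0 + 1 from rfl, go_succ]
    by_cases h : c' = c
    · subst h; simp [List.isPrefixOf, go_zero]
    · have hbe : (c == c') = false := by simp [Ne.symm h]
      simp [List.isPrefixOf, hbe, h, go_zero]
  | cons d t =>
    simp only [PySem.Chars.rfind, List.length_append, List.length_cons, List.length_nil]
    have hd1 : List.drop (t.length + 1 + 1) ((d :: t) ++ [c']) = [] := by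
      apply List.drop_eq_nil_of_le; simp
    have hd2 : List.drop (t.length + 1) ((d :: t) ++ [c']) = [c'] := by
      rw [show t.length + 1 = (d :: t).length by simp, List.drop_left]
    have hd3 : List.drop (t.length + 1) (d :: t) = [] := by
      apply List.drop_eq_nil_of_le; simp
    have hga := go_append (d :: t) c' c t.length (by simp)
    rw [List.cons_append] at hga
    by_cases h : c' = c
    · subst h; simp [go_succ, hd1, hd2, hd3, hga, List.isPrefixOf]
    · have hbe : (c == c') = false := by simp [Ne.symm h]
      simp [go_succ, hd1, hd2, hd3, hga, List.isPrefixOf, hbe, h]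

theorem rfind_single_eq_lastP (cs : List Char) (c : Char) :
    PySem.Chars.rfind cs [c] = lastP (fun x => x == c) cs := by
  induction cs using List.reverseRecOn with
  | nil => rfl
  | append_singleton cs c' ih =>
    rw [rfind_single_append, lastP_append]
    by_cases h : c' = c <;> simp [h, ih]

theorem max2_getD (a b : Int) : (PySem.List.max? [a, b] id).getD (-1) = max a b := by
  by_cases h1 : a < b <;> simp [PySem.List.max?, List.foldl, h1] <;> omega

theorem max3_getD (a b c : Int) :
    (PySem.List.max? [a, b, c] id).getD (-1) = max a (max b c) := by
  by_cases h1 : a < b <;> by_cases h2 : b < c <;> by_cases h3 : a < c <;>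
    simp [PySem.List.max?, List.foldl, h1, h2, h3] <;> omega

theorem max1_getD (a : Int) : (PySem.List.max? [a] id).getD (-1) = a := by
  simp [PySem.List.max?, List.foldl]

theorem lastP_or2 (p q : Char → Bool) (cs : List Char) :
    lastP (fun x => p x || q x) cs = max (lastP p cs) (lastP q cs) := by
  induction cs using List.reverseRecOn with
  | nil => simp [lastP]
  | append_singleton cs c ih =>
    have h1 := lastP_lt_length p cs
    have h2 := lastP_lt_length q cs
    rw [lastP_append, lastP_append, lastP_append, ih]
    by_cases hp : p c <;> by_cases hq : q c <;> simp [hp, hq] <;> omega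

theorem lastP_or3 (p q r : Char → Bool) (cs : List Char) :
    lastP (fun x => p x || q x || r x) cs =
      max (lastP p cs) (max (lastP q cs) (lastP r cs)) := by
  induction cs using List.reverseRecOn with
  | nil => simp [lastP]
  | append_singleton cs c ih =>
    have h1 := lastP_lt_length p cs
    have h2 := lastP_lt_length q cs
    have h3 := lastP_lt_length r cs
    rw [lastP_append, lastP_append, lastP_append, lastP_append, ih]
    by_cases hp : p c <;> by_cases hq : q c <;> by_cases hr : r c <;>
      simp [hp, hq, hr] <;> omega

-- the four per-class maxima A computes are the four rightmost class positions
theorem maxRfindA_class1 (cut : List Char) :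
    maxRfindA cut ['\n'] = lastP (fun x => x == '\n') cut := by
  simp only [maxRfindA, List.map]
  rw [max1_getD, rfind_single_eq_lastP]

theorem maxRfindA_class2 (cut : List Char) :
    maxRfindA cut ['.', '!', '?'] =
      lastP (fun x => x == '.' || x == '!' || x == '?') cut := by
  simp only [maxRfindA, List.map]
  rw [max3_getD, rfind_single_eq_lastP, rfind_single_eq_lastP, rfind_single_eq_lastP,
    lastP_or3]

theorem maxRfindA_class3 (cut : List Char) :
    maxRfindA cut [',', ';'] = lastP (fun x => x == ',' || x == ';') cut := by
  simp only [maxRfindA, List.map]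
  rw [max2_getD, rfind_single_eq_lastP, rfind_single_eq_lastP, lastP_or2]

theorem maxRfindA_class4 (cut : List Char) :
    maxRfindA cut [' '] = lastP (fun x => x == ' ') cut := by
  simp only [maxRfindA, List.map]
  rw [max1_getD, rfind_single_eq_lastP]

-- what B's backward scan computes, in terms of the rightmost class positions
def bestSpec (m : Int) (cut : List Char) (br bi : Int) : Int × Int :=
  if 0 < br ∧ m ≤ lastP (fun x => x == '\n') cut then (0, lastP (fun x => x == '\n') cut)
  else if 1 < br ∧ m ≤ lastP (fun x => x == '.' || x == '!' || x == '?') cut then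
    (1, lastP (fun x => x == '.' || x == '!' || x == '?') cut)
  else if 2 < br ∧ m ≤ lastP (fun x => x == ',' || x == ';') cut then
    (2, lastP (fun x => x == ',' || x == ';') cut)
  else if 3 < br ∧ m ≤ lastP (fun x => x == ' ') cut then (3, lastP (fun x => x == ' ') cut)
  else (br, bi)

theorem loopB_stable (cut : List Char) (c : Char) (m : Int) (hm : 0 ≤ m) :
    ∀ (n : Nat) (b : Int × Int) (i : Int), (i - m + 1).toNat ≤ n → i < (cut.length : Int) →
      loopB (cut ++ [c]) m b i = loopB cut m b i := by
  intro n
  induction n with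
  | zero =>
    intro b i hn hi
    have hg : ¬ (m ≤ i ∧ 0 < b.1) := by omega
    conv_lhs => rw [loopB]
    conv_rhs => rw [loopB]
    rw [dif_neg hg, dif_neg hg]
  | succ n ih =>
    intro b i hn hi
    by_cases hg : m ≤ i ∧ 0 < b.1
    · conv_lhs => rw [loopB]
      conv_rhs => rw [loopB]
      rw [dif_pos hg, dif_pos hg]
      have hget : PySem.List.pyGet? (cut ++ [c]) i = PySem.List.pyGet? cut i := by
        rw [PySem.List.pyGet?_of_nonneg _ (by omega : (0:Int) ≤ i),
          PySem.List.pyGet?_of_nonneg _ (by omega : (0:Int) ≤ i),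
          List.getElem?_append_left (by omega)]
      rw [hget]
      exact ih _ (i - 1) (by omega) (by omega)
    · conv_lhs => rw [loopB]
      conv_rhs => rw [loopB]
      rw [dif_neg hg, dif_neg hg]

theorem rankOf_nonneg (c : Char) : 0 ≤ rankOf c := by
  unfold rankOf; split_ifs <;> norm_num

theorem rankOf_le_four (c : Char) : rankOf c ≤ 4 := by
  unfold rankOf; split_ifs <;> norm_num

theorem loopB_spec (m : Int) (hm : 0 ≤ m) (cut : List Char) :
    ∀ (br bi : Int), 0 ≤ br → br ≤ 4 →
      loopB cut m (br, bi) ((cut.length : Int) - 1) = bestSpec m cut br bi := by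
  induction cut using List.reverseRecOn with
  | nil =>
    intro br bi hbr hbr4
    have hg : ¬ (m ≤ (([] : List Char).length : Int) - 1 ∧ 0 < ((br, bi) : Int × Int).1) := by
      rintro ⟨hc, -⟩; simp only [List.length_nil, Nat.cast_zero] at hc; omega
    conv_lhs => rw [loopB]
    rw [dif_neg hg]
    have b1 := lastP_lt_length (fun x => x == '\n') ([] : List Char)
    have b2 := lastP_lt_length (fun x => x == '.' || x == '!' || x == '?') ([] : List Char)
    have b3 := lastP_lt_length (fun x => x == ',' || x == ';') ([] : List Char)
    have b4 := lastP_lt_length (fun x => x == ' ') ([] : List Char)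
    simp only [List.length_nil, Nat.cast_zero] at b1 b2 b3 b4
    unfold bestSpec
    rw [if_neg (by omega), if_neg (by omega), if_neg (by omega), if_neg (by omega)]
  | append_singleton cs c ih =>
    intro br bi hbr hbr4
    have hlen : (((cs ++ [c]).length : Int)) - 1 = (cs.length : Int) := by simp
    rw [hlen]
    have b1 := lastP_lt_length (fun x => x == '\n') cs
    have b2 := lastP_lt_length (fun x => x == '.' || x == '!' || x == '?') cs
    have b3 := lastP_lt_length (fun x => x == ',' || x == ';') cs
    have b4 := lastP_lt_length (fun x => x == ' ') cs
    by_cases hg : m ≤ (cs.length : Int) ∧ 0 < br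
    · conv_lhs => rw [loopB]
      rw [dif_pos (show m ≤ (cs.length : Int) ∧ 0 < ((br, bi) : Int × Int).1 from hg)]
      have hget : PySem.List.pyGet? (cs ++ [c]) ((cs.length : Int)) = some c :=
        PySem.List.pyGet?_append_length (ys := []) (y := c) (pre := cs)
      simp only [hget, Option.getD_some]
      have hstep : ∀ b' : Int × Int, 0 ≤ b'.1 → b'.1 ≤ 4 →
          loopB (cs ++ [c]) m b' ((cs.length : Int) - 1) = bestSpec m cs b'.1 b'.2 := by
        intro b' hb' hb4
        rw [loopB_stable cs c m hm ((cs.length : Int) - 1 - m + 1).toNat b' _ (le_refl _)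
          (by omega)]
        exact ih b'.1 b'.2 hb' hb4
      have hb' : (0 : Int) ≤ (if rankOf c < br then ((rankOf c, (cs.length : Int)) : Int × Int) else (br, bi)).1 := by
        split_ifs with hrb
        · exact rankOf_nonneg c
        · exact hbr
      have hb4 : (if rankOf c < br then ((rankOf c, (cs.length : Int)) : Int × Int) else (br, bi)).1 ≤ 4 := by
        split_ifs with hrb
        · exact rankOf_le_four c
        · exact hbr4
      rw [hstep _ hb' hb4]
      by_cases h1 : c = '\n'
      · have hr : rankOf c = 0 := by simp [rankOf, h1]
        have q1 : ((c == '\n') : Bool) = true := by simp [h1]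
        have q2 : ((c == '.' || c == '!' || c == '?') : Bool) = false := by simp [h1]
        have q3 : ((c == ',' || c == ';') : Bool) = false := by simp [h1]
        have q4 : ((c == ' ') : Bool) = false := by simp [h1]
        have e1 : lastP (fun x => x == '\n') (cs ++ [c]) = (cs.length : Int) := by
          rw [lastP_append, q1]; simp
        have e2 : lastP (fun x => x == '.' || x == '!' || x == '?') (cs ++ [c]) = lastP (fun x => x == '.' || x == '!' || x == '?') cs := by
          rw [lastP_append, q2]; simp
        have e3 : lastP (fun x => x == ',' || x == ';') (cs ++ [c]) = lastP (fun x => x == ',' || x == ';') cs := by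
          rw [lastP_append, q3]; simp
        have e4 : lastP (fun x => x == ' ') (cs ++ [c]) = lastP (fun x => x == ' ') cs := by
          rw [lastP_append, q4]; simp
        rw [hr]
        by_cases hrb : (0 : Int) < br
        · rw [if_pos hrb]
          dsimp only
          unfold bestSpec
          rw [e1, e2, e3, e4]
          split_ifs <;> first | rfl | omega | (exfalso; omega) | (rw [Prod.mk.injEq]; exact ⟨by omega, by omega⟩)
        · rw [if_neg hrb]
          dsimp only
          unfold bestSpec
          rw [e1, e2, e3, e4]
          split_ifs <;> first | rfl | omega | (exfalso; omega) | (rw [Prod.mk.injEq]; exact ⟨by omega, by omega⟩)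
      · by_cases h2 : c = '.' ∨ c = '!' ∨ c = '?'
        · have hr : rankOf c = 1 := by rcases h2 with h | h | h <;> simp [rankOf, h]
          have q1 : ((c == '\n') : Bool) = false := by simp [h1]
          have q2 : ((c == '.' || c == '!' || c == '?') : Bool) = true := by
            rcases h2 with h | h | h <;> simp [h]
          have q3 : ((c == ',' || c == ';') : Bool) = false := by
            rcases h2 with h | h | h <;> simp [h]
          have q4 : ((c == ' ') : Bool) = false := by
            rcases h2 with h | h | h <;> simp [h]
          have e1 : lastP (fun x => x == '\n') (cs ++ [c]) = lastP (fun x => x == '\n') cs := by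
            rw [lastP_append, q1]; simp
          have e2 : lastP (fun x => x == '.' || x == '!' || x == '?') (cs ++ [c]) = (cs.length : Int) := by
            rw [lastP_append, q2]; simp
          have e3 : lastP (fun x => x == ',' || x == ';') (cs ++ [c]) = lastP (fun x => x == ',' || x == ';') cs := by
            rw [lastP_append, q3]; simp
          have e4 : lastP (fun x => x == ' ') (cs ++ [c]) = lastP (fun x => x == ' ') cs := by
            rw [lastP_append, q4]; simp
          rw [hr]
          by_cases hrb : (1 : Int) < br
          · rw [if_pos hrb]
            dsimp only
            unfold bestSpec
            rw [e1, e2, e3, e4]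
            split_ifs <;> first | rfl | omega | (exfalso; omega) | (rw [Prod.mk.injEq]; exact ⟨by omega, by omega⟩)
          · rw [if_neg hrb]
            dsimp only
            unfold bestSpec
            rw [e1, e2, e3, e4]
            split_ifs <;> first | rfl | omega | (exfalso; omega) | (rw [Prod.mk.injEq]; exact ⟨by omega, by omega⟩)
        · by_cases h3 : c = ',' ∨ c = ';'
          · have hr : rankOf c = 2 := by rcases h3 with h | h <;> simp [rankOf, h]
            have q1 : ((c == '\n') : Bool) = false := by simp [h1]
            have q2 : ((c == '.' || c == '!' || c == '?') : Bool) = false := by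
              rcases h3 with h | h <;> simp [h]
            have q3 : ((c == ',' || c == ';') : Bool) = true := by
              rcases h3 with h | h <;> simp [h]
            have q4 : ((c == ' ') : Bool) = false := by
              rcases h3 with h | h <;> simp [h]
            have e1 : lastP (fun x => x == '\n') (cs ++ [c]) = lastP (fun x => x == '\n') cs := by
              rw [lastP_append, q1]; simp
            have e2 : lastP (fun x => x == '.' || x == '!' || x == '?') (cs ++ [c]) = lastP (fun x => x == '.' || x == '!' || x == '?') cs := by
              rw [lastP_append, q2]; simp
            have e3 : lastP (fun x => x == ',' || x == ';') (cs ++ [c]) = (cs.length : Int) := by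
              rw [lastP_append, q3]; simp
            have e4 : lastP (fun x => x == ' ') (cs ++ [c]) = lastP (fun x => x == ' ') cs := by
              rw [lastP_append, q4]; simp
            rw [hr]
            by_cases hrb : (2 : Int) < br
            · rw [if_pos hrb]
              dsimp only
              unfold bestSpec
              rw [e1, e2, e3, e4]
              split_ifs <;> first | rfl | omega | (exfalso; omega) | (rw [Prod.mk.injEq]; exact ⟨by omega, by omega⟩)
            · rw [if_neg hrb]
              dsimp only
              unfold bestSpec
              rw [e1, e2, e3, e4]
              split_ifs <;> first | rfl | omega | (exfalso; omega) | (rw [Prod.mk.injEq]; exact ⟨by omega, by omega⟩)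
          · by_cases h4 : c = ' '
            · have hr : rankOf c = 3 := by
                simp only [rankOf, if_neg h1]
                rw [if_neg h2, if_neg h3, if_pos h4]
              have q1 : ((c == '\n') : Bool) = false := by simp [h4]
              have q2 : ((c == '.' || c == '!' || c == '?') : Bool) = false := by simp [h4]
              have q3 : ((c == ',' || c == ';') : Bool) = false := by simp [h4]
              have q4 : ((c == ' ') : Bool) = true := by simp [h4]
              have e1 : lastP (fun x => x == '\n') (cs ++ [c]) = lastP (fun x => x == '\n') cs := by
                rw [lastP_append, q1]; simp
              have e2 : lastP (fun x => x == '.' || x == '!' || x == '?') (cs ++ [c]) = lastP (fun x => x == '.' || x == '!' || x == '?') cs := by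
                rw [lastP_append, q2]; simp
              have e3 : lastP (fun x => x == ',' || x == ';') (cs ++ [c]) = lastP (fun x => x == ',' || x == ';') cs := by
                rw [lastP_append, q3]; simp
              have e4 : lastP (fun x => x == ' ') (cs ++ [c]) = (cs.length : Int) := by
                rw [lastP_append, q4]; simp
              rw [hr]
              by_cases hrb : (3 : Int) < br
              · rw [if_pos hrb]
                dsimp only
                unfold bestSpec
                rw [e1, e2, e3, e4]
                split_ifs <;> first | rfl | omega | (exfalso; omega) | (rw [Prod.mk.injEq]; exact ⟨by omega, by omega⟩)
              · rw [if_neg hrb]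
                dsimp only
                unfold bestSpec
                rw [e1, e2, e3, e4]
                split_ifs <;> first | rfl | omega | (exfalso; omega) | (rw [Prod.mk.injEq]; exact ⟨by omega, by omega⟩)
            · have hr : rankOf c = 4 := by
                simp only [rankOf, if_neg h1]
                rw [if_neg h2, if_neg h3, if_neg h4]
              have q1 : ((c == '\n') : Bool) = false := by simp [h1]
              have q2 : ((c == '.' || c == '!' || c == '?') : Bool) = false := by
                push_neg at h2; simp [h2.1, h2.2.1, h2.2.2]
              have q3 : ((c == ',' || c == ';') : Bool) = false := by
                push_neg at h3; simp [h3.1, h3.2]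
              have q4 : ((c == ' ') : Bool) = false := by simp [h4]
              have e1 : lastP (fun x => x == '\n') (cs ++ [c]) = lastP (fun x => x == '\n') cs := by
                rw [lastP_append, q1]; simp
              have e2 : lastP (fun x => x == '.' || x == '!' || x == '?') (cs ++ [c]) = lastP (fun x => x == '.' || x == '!' || x == '?') cs := by
                rw [lastP_append, q2]; simp
              have e3 : lastP (fun x => x == ',' || x == ';') (cs ++ [c]) = lastP (fun x => x == ',' || x == ';') cs := by
                rw [lastP_append, q3]; simp
              have e4 : lastP (fun x => x == ' ') (cs ++ [c]) = lastP (fun x => x == ' ') cs := by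
                rw [lastP_append, q4]; simp
              rw [hr]
              by_cases hrb : (4 : Int) < br
              · exact absurd hrb (by omega)
              · rw [if_neg hrb]
                dsimp only
                unfold bestSpec
                rw [e1, e2, e3, e4]
    · conv_lhs => rw [loopB]
      rw [dif_neg (by exact fun hc => hg ⟨hc.1, hc.2⟩)]
      have b1' := lastP_lt_length (fun x => x == '\n') (cs ++ [c])
      have b2' := lastP_lt_length (fun x => x == '.' || x == '!' || x == '?') (cs ++ [c])
      have b3' := lastP_lt_length (fun x => x == ',' || x == ';') (cs ++ [c])
      have b4' := lastP_lt_length (fun x => x == ' ') (cs ++ [c])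
      have hlen2 : (((cs ++ [c]).length : Int)) = (cs.length : Int) + 1 := by simp
      rw [hlen2] at b1' b2' b3' b4'
      unfold bestSpec
      rw [if_neg (by omega), if_neg (by omega), if_neg (by omega), if_neg (by omega)]

theorem radical_cut_eq_alt (prompt : String) (ch_limit : Int) (uncertainty : Int) :
    radical_cut prompt ch_limit uncertainty = radical_cut_alt prompt ch_limit uncertainty := by
  unfold radical_cut radical_cut_alt
  by_cases h0 : ch_limit ≤ 0
  · rw [if_pos h0, if_pos h0]
  · rw [if_neg h0, if_neg h0]
    dsimp only
    by_cases h1 : (prompt.toList.length : Int) ≤ uncertainty + ch_limit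
    · rw [if_pos h1, if_pos h1]
    · rw [if_neg h1, if_neg h1]
      set min_limit := max 0 (ch_limit - uncertainty) with hmin
      set cut := PySem.List.slice prompt.toList none (some (uncertainty + ch_limit)) with hcut
      have hml : 0 ≤ min_limit := le_max_left _ _
      rw [loopB_spec min_limit hml cut 4 (-1) (by norm_num) (by norm_num)]
      simp only [loopA, maxRfindA_class1, maxRfindA_class2, maxRfindA_class3,
        maxRfindA_class4]
      set L1 := lastP (fun x => x == '\n') cut with hL1
      set L2 := lastP (fun x => x == '.' || x == '!' || x == '?') cut with hL2
      set L3 := lastP (fun x => x == ',' || x == ';') cut with hL3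
      set L4 := lastP (fun x => x == ' ') cut with hL4
      by_cases g1 : min_limit ≤ L1
      · have hbs : bestSpec min_limit cut 4 (-1) = (0, L1) := by
          unfold bestSpec; rw [← hL1, if_pos ⟨by norm_num, g1⟩]
        rw [hbs, if_pos (show L1 ≥ min_limit from g1),
          if_pos (show ((0 : Int), L1).2 ≠ -1 by dsimp only; omega)]
      · rw [if_neg (show ¬ L1 ≥ min_limit from g1)]
        by_cases g2 : min_limit ≤ L2
        · have hbs : bestSpec min_limit cut 4 (-1) = (1, L2) := by
            unfold bestSpec; rw [← hL1, ← hL2, if_neg (by omega), if_pos ⟨by norm_num, g2⟩]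
          rw [hbs, if_pos (show L2 ≥ min_limit from g2),
            if_pos (show ((1 : Int), L2).2 ≠ -1 by dsimp only; omega)]
        · rw [if_neg (show ¬ L2 ≥ min_limit from g2)]
          by_cases g3 : min_limit ≤ L3
          · have hbs : bestSpec min_limit cut 4 (-1) = (2, L3) := by
              unfold bestSpec
              rw [← hL1, ← hL2, ← hL3, if_neg (by omega), if_neg (by omega),
                if_pos ⟨by norm_num, g3⟩]
            rw [hbs, if_pos (show L3 ≥ min_limit from g3),
              if_pos (show ((2 : Int), L3).2 ≠ -1 by dsimp only; omega)]
          · rw [if_neg (show ¬ L3 ≥ min_limit from g3)]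
            by_cases g4 : min_limit ≤ L4
            · have hbs : bestSpec min_limit cut 4 (-1) = (3, L4) := by
                unfold bestSpec
                rw [← hL1, ← hL2, ← hL3, ← hL4, if_neg (by omega), if_neg (by omega),
                  if_neg (by omega), if_pos ⟨by norm_num, g4⟩]
              rw [hbs, if_pos (show L4 ≥ min_limit from g4),
                if_pos (show ((3 : Int), L4).2 ≠ -1 by dsimp only; omega)]
            · -- no class qualifies; A's trailing 'space' block also fails (space = L4 < min_limit)
              have hbs : bestSpec min_limit cut 4 (-1) = (4, -1) := by
                unfold bestSpec
                rw [← hL1, ← hL2, ← hL3, ← hL4, if_neg (by omega), if_neg (by omega),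
                  if_neg (by omega), if_neg (by omega)]
              have hsp : PySem.Chars.rfind cut [' '] = L4 := by
                rw [hL4, rfind_single_eq_lastP]
              rw [if_neg (show ¬ L4 ≥ min_limit from g4), hbs, hsp,
                if_neg (fun h => g4 h.2),
                if_neg (show ¬ (((4 : Int), (-1 : Int)).2 ≠ -1) by dsimp only; omega)]

-- ===== VERDICT (by name: the statement is the Claim_ definition above) =====
theorem radical_cut_spec : Claim_equal_radical_cut := by
  intro prompt ch_limit uncertainty _
  unfold Spec_radical_cut
  exact radical_cut_eq_alt prompt ch_limit uncertainty
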